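-- pv_equiv track=rewrite | github.com/shelly2904/DSA-Practice | ARRAY/move_zeroes.py | move_zeroes_left
-- ===== SOURCE A (Python) =====
-- def move_zeroes_left(arr):
--     i = j = len(arr) - 1
--
--     while i >= 0 and j >= 0:
--         if arr[i] != 0:
--             arr[j] = arr[i]
--             j -= 1
--         i -= 1
--
--     while j >= 0:
--         arr[j] = 0
--         j -= 1
--
--     return arr
-- ===== SOURCE B (Python) =====
-- def move_zeroes_left(arr):
--     nonzeros = [x for x in arr if x != 0]
--     zeros = len(arr) - len(nonzeros)
--     arr[:] = [0] * zeros + nonzeros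
--     return arr
-- ===== Notes on version B (the rewrite author's own statement) =====
-- stated objective: faster
-- what changed: A's backward two-pointer overwrite loop plus a zero-fill loop is replaced by a forward filter of the non-zero elements and a one-shot reconstruction (a zeros prefix concatenated with the nonzeros, slice-assigned into arr).
import Mathlib
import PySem

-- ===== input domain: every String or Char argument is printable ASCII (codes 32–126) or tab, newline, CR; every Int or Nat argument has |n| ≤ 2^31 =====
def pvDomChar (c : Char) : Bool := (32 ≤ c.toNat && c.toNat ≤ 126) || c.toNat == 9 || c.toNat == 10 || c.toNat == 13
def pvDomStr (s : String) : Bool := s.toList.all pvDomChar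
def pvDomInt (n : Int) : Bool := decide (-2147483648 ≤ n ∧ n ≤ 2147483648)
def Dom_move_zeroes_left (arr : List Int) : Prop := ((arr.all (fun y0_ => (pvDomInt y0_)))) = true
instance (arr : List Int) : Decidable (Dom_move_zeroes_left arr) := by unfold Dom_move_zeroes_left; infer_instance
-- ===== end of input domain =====

-- B replaces A's backward two-pointer overwrite loops by a forward filter plus a
-- one-shot reconstruction (zeros prefix ++ nonzeros); equal return value; a timing run measured B faster by a constant factor (bulk comprehension+concat vs per-element index loop).
-- A mutates its argument in place; B mimics that via arr[:] = …, the equivalence proved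
-- here is about the (identical) returned list value.

-- ===== PORT A =====
-- first while loop: i, j walk down from len-1; arr[i] and arr[j]=… are always in range
-- (0 ≤ i ≤ j < len throughout), so getD/set with .toNat are exact here.
def pvLoop1 (arr : List Int) (i j : Int) : List Int × Int :=
  if _h : i ≥ 0 ∧ j ≥ 0 then
    if arr.getD i.toNat 0 ≠ 0 then
      pvLoop1 (arr.set j.toNat (arr.getD i.toNat 0)) (i - 1) (j - 1)
    else
      pvLoop1 arr (i - 1) j
  else (arr, j)
termination_by (i + 1).toNat
decreasing_by all_goals omega

-- second while loop: arr[j] = 0 for j down to 0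
def pvLoop2 (arr : List Int) (j : Int) : List Int :=
  if j ≥ 0 then pvLoop2 (arr.set j.toNat 0) (j - 1) else arr
termination_by (j + 1).toNat
decreasing_by omega

def move_zeroes_left (arr : List Int) : List Int :=
  let i : Int := (arr.length : Int) - 1
  let p := pvLoop1 arr i i
  pvLoop2 p.1 p.2

-- ===== PORT B =====
def move_zeroes_left_alt (arr : List Int) : List Int :=
  let nonzeros := arr.filter (fun x => x != 0)
  let zeros := arr.length - nonzeros.length
  List.replicate zeros 0 ++ nonzeros

-- ===== PRECONDITION & SPEC =====
def Spec_move_zeroes_left (arr : List Int) (out : List Int) : Prop := out = move_zeroes_left_alt arr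
instance (arr : List Int) (out : List Int) : Decidable (Spec_move_zeroes_left arr out) := by unfold Spec_move_zeroes_left; infer_instance

-- ===== CLAIM (what is proved, stated in full; the proofs are below) =====
def Claim_equal_move_zeroes_left : Prop := ∀ (arr : List Int), Dom_move_zeroes_left arr → Spec_move_zeroes_left arr (move_zeroes_left arr)

-- ===== LEMMAS AND PROOFS =====

-- pvLoop2 on a list g ++ d with j = |g| - 1 zeroes out the first |g| positions.
theorem pvLoop2_spec (g d : List Int) :
    pvLoop2 (g ++ d) ((g.length : Int) - 1) = List.replicate g.length 0 ++ d := by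
  induction g using List.reverseRecOn generalizing d with
  | nil => simp [pvLoop2]
  | append_singleton g' x ih =>
      rw [pvLoop2]
      have hlen : (((g' ++ [x]).length : Int) - 1) = (g'.length : Int) := by simp
      have hge : ((g' ++ [x]).length : Int) - 1 ≥ 0 := by simp
      rw [if_pos hge]
      have hset : ((g' ++ [x]) ++ d).set (((g' ++ [x]).length : Int) - 1).toNat 0
          = g' ++ ((0 : Int) :: d) := by
        have : (((g' ++ [x]).length : Int) - 1).toNat = g'.length := by simp
        rw [this, List.append_assoc, List.set_append_right _ _ (le_refl _)]
        simp
      rw [hset, hlen]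
      have := ih ((0 : Int) :: d)
      rw [this]
      simp [List.replicate_succ']

-- main invariant: state t ++ g ++ d with i = |t| - 1, j = |t| + |g| - 1;
-- t = still-unscanned original prefix, g = garbage region, d = collected nonzeros.
theorem pvLoops_spec (t g d : List Int) :
    pvLoop2 (pvLoop1 (t ++ g ++ d) ((t.length : Int) - 1) ((t.length : Int) + g.length - 1)).1
            (pvLoop1 (t ++ g ++ d) ((t.length : Int) - 1) ((t.length : Int) + g.length - 1)).2
      = List.replicate (t.length + g.length - (t.filter (fun x => x != 0)).length) 0
          ++ t.filter (fun x => x != 0) ++ d := by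
  induction t using List.reverseRecOn generalizing g d with
  | nil =>
      rw [pvLoop1]
      simp only [List.length_nil]
      rw [dif_neg (by omega)]
      have h : (((0:Nat) : Int) + g.length - 1) = ((g.length : Int) - 1) := by simp
      simp only [List.nil_append]
      rw [h, pvLoop2_spec g d]
      simp
  | append_singleton t' x ih =>
      rw [pvLoop1]
      have hi : (((t' ++ [x]).length : Int) - 1) = (t'.length : Int) := by simp
      rw [dif_pos (by simp; omega)]
      have hread : ((t' ++ [x]) ++ g ++ d).getD (((t' ++ [x]).length : Int) - 1).toNat 0 = x := by
        have h1 : (((t' ++ [x]).length : Int) - 1).toNat = t'.length := by simp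
        rw [h1, List.append_assoc, List.append_assoc, List.getD_eq_getElem?_getD,
          List.getElem?_append_right (le_refl _)]
        simp
      rw [hread]
      by_cases hx : x = 0
      · subst hx
        rw [if_neg (by simp)]
        have harr : (t' ++ [(0 : Int)]) ++ g ++ d = t' ++ ((0 : Int) :: g) ++ d := by simp
        have hj : ((t' ++ [(0 : Int)]).length : Int) + g.length - 1
            = (t'.length : Int) + ((0 : Int) :: g).length - 1 := by simp; ring
        rw [hi, harr, hj]
        have := ih ((0 : Int) :: g) d
        have hsub : (t'.length : Int) - 1 = (t'.length : Int) - 1 := rfl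
        rw [this]
        simp
        omega
      · rw [if_pos (by simpa using hx)]
        -- set index j = |t'| + |g| (last element of t' ++ [x] ++ g) to x
        have hjv : (((t' ++ [x]).length : Int) + g.length - 1).toNat = t'.length + g.length := by
          simp; omega
        have hset : (((t' ++ [x]) ++ g ++ d).set (((t' ++ [x]).length : Int) + g.length - 1).toNat x)
            = t' ++ (x :: g).dropLast ++ (x :: d) := by
          rw [hjv]
          have hsplit : (t' ++ [x]) ++ g ++ d = (t' ++ (x :: g).dropLast) ++ ((x :: g).getLast (by simp) :: d) := by
            have := List.dropLast_append_getLast (l := x :: g) (by simp)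
            calc (t' ++ [x]) ++ g ++ d = t' ++ (x :: g) ++ d := by simp
              _ = t' ++ ((x :: g).dropLast ++ [(x :: g).getLast (by simp)]) ++ d := by rw [this]
              _ = (t' ++ (x :: g).dropLast) ++ ((x :: g).getLast (by simp) :: d) := by simp
          rw [hsplit, List.set_append_right _ _ (by simp)]
          have : t'.length + g.length - (t' ++ (x :: g).dropLast).length = 0 := by simp
          rw [this]
          simp
        rw [hset, hi]
        have hj2 : ((t' ++ [x]).length : Int) + g.length - 1 - 1
            = (t'.length : Int) + ((x :: g).dropLast).length - 1 := by simp; ring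
        rw [hj2]
        have := ih ((x :: g).dropLast) (x :: d)
        rw [this]
        have hfil : (t' ++ [x]).filter (fun y => y != 0) = t'.filter (fun y => y != 0) ++ [x] := by
          simp [List.filter_append, hx]
        rw [hfil]
        have hlen : t'.length + ((x :: g).dropLast).length
              - (t'.filter (fun y => y != 0)).length
            = (t' ++ [x]).length + g.length
              - ((t'.filter (fun y => y != 0)) ++ [x]).length := by
          have := List.length_filter_le (fun y => y != 0) t'
          simp at this ⊢
          omega
        rw [hlen]
        simp

-- ===== VERDICT (by name: the statement is the Claim_ definition above) =====
theorem move_zeroes_left_spec : Claim_equal_move_zeroes_left := by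
  intro arr _
  show move_zeroes_left arr = move_zeroes_left_alt arr
  have h := pvLoops_spec arr [] []
  simp only [List.length_nil, List.append_nil, Nat.cast_zero] at h
  unfold move_zeroes_left move_zeroes_left_alt
  simp only []
  have harg : (arr.length : Int) - 1 = (arr.length : Int) + 0 - 1 := by ring
  rw [harg]
  exact h
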